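-- pv_equiv track=rewrite | github.com/lasksafj/LeetCode | 3831-find-x-value-of-array-i/3831-find-x-value-of-array-i.py | resultArray
-- ===== SOURCE A (Python) =====
-- from typing import List
--
-- def resultArray(nums: List[int], k: int) -> List[int]:
--     N = len(nums)
--     dp = [[0]*(N+1) for _ in range(k)]
--     for i in range(1, N+1):
--         a = nums[i-1]
--         for m in range(k):
--             dp[(m*a)%k][i] += dp[m][i-1]
--         dp[a%k][i] += 1
--     return [sum(row) for row in dp]
-- ===== SOURCE B (Python) =====
-- from typing import List
--
-- def resultArray(nums: List[int], k: int) -> List[int]: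
--     N = len(nums)
--     ans = [0] * k
--     for l in range(N):
--         p = 1
--         for x in nums[l:]:
--             p = (p * x) % k
--             ans[p] += 1
--     return ans
-- ===== Notes on version B (the rewrite author's own statement) =====
-- stated objective: simpler
-- what changed: Replaces A's per-index residue-distribution DP (a k x (N+1) table remapped over all k residues at each step, then row-summed) by direct brute-force enumeration: for each start index keep one running product mod k and bump the bucket of every subarray extending it.
import Mathlib
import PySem

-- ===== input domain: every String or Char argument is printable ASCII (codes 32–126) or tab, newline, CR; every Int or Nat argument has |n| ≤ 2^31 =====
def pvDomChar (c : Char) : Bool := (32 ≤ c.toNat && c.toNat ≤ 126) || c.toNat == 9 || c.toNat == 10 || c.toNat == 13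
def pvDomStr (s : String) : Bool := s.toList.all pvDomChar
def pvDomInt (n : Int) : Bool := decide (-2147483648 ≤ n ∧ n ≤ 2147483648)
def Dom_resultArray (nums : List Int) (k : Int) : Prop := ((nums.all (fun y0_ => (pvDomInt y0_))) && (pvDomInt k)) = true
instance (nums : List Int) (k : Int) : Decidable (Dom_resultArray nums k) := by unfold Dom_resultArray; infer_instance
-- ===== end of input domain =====

-- B replaces A's O(N*k) residue-distribution DP by direct brute-force enumeration of all
-- subarrays (O(N^2)): simpler, and structurally a different algorithm; not claimed faster.

-- ===== PORT A =====
def resultArray (nums : List Int) (k : Int) : List Int :=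
  let N := nums.length
  let dp0 : List (List Int) := (List.range k.toNat).map (fun _ => List.replicate (N + 1) (0 : Int))
  let dp := (List.range N).foldl (fun d i0 =>
    let i := i0 + 1
    let a := nums.getD (i - 1) 0
    let d1 := (List.range k.toNat).foldl (fun d2 m =>
      d2.modify (PySem.Int.mod ((m : Int) * a) k).toNat
        (fun row => row.modify i (· + (d2.getD m []).getD (i - 1) 0))) d
    d1.modify (PySem.Int.mod a k).toNat (fun row => row.modify i (· + 1))) dp0
  dp.map (fun row => row.sum)

-- ===== PORT B =====
def resultArray_alt (nums : List Int) (k : Int) : List Int :=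
  (List.range nums.length).foldl (fun ans l =>
    ((nums.drop l).foldl (fun (st : Int × List Int) x =>
        let p := PySem.Int.mod (st.1 * x) k
        (p, st.2.modify p.toNat (· + 1))) ((1 : Int), ans)).2)
    (List.replicate k.toNat (0 : Int))

-- ===== PRECONDITION & SPEC =====
-- Pre_ excludes exactly the inputs where Python A raises: for k ≤ 0 with nonempty nums the
-- inner indexing a % k hits ZeroDivisionError (k = 0) or IndexError (k < 0, dp is empty).
def Pre_resultArray (nums : List Int) (k : Int) : Prop := 1 ≤ k ∨ nums = []
instance (nums : List Int) (k : Int) : Decidable (Pre_resultArray nums k) := by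
  unfold Pre_resultArray; infer_instance
def pvWitness_resultArray : List Int × Int := ([1, 2, 3], 4)

def Spec_resultArray (nums : List Int) (k : Int) (out : List Int) : Prop := out = resultArray_alt nums k
instance (nums : List Int) (k : Int) (out : List Int) : Decidable (Spec_resultArray nums k out) := by unfold Spec_resultArray; infer_instance

-- ===== CLAIM (what is proved, stated in full; the proofs are below) =====
def Claim_equal_resultArray : Prop := ∀ (nums : List Int) (k : Int), Dom_resultArray nums k → Pre_resultArray nums k → Spec_resultArray nums k (resultArray nums k)

-- ===== LEMMAS AND PROOFS =====

-- product-mod state after folding a block of elements (the running p of B's inner loop)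
def pq (k p : Int) (ys : List Int) : Int := ys.foldl (fun acc x => PySem.Int.mod (acc * x) k) p

-- residues of the nonempty prefixes of xs, starting from running product p (B's inner loop trace)
def resid (k : Int) (p : Int) : List Int → List Int
  | [] => []
  | x :: t => PySem.Int.mod (p * x) k :: resid k (PySem.Int.mod (p * x) k) t

-- residues of the subarrays ENDING at the last element of t (A's dp column contents)
def ends (k : Int) (t : List Int) : List Int :=
  t.foldl (fun e a => e.map (fun m => PySem.Int.mod (m * a) k) ++ [PySem.Int.mod a k]) []

-- all subarray residues grouped by end position (A's view) / by start position (B's view)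
def aL (k : Int) (t : List Int) : List Int :=
  (List.range t.length).flatMap (fun i => ends k (t.take (i + 1)))
def bL (k : Int) (t : List Int) : List Int :=
  (List.range t.length).flatMap (fun l => resid k 1 (t.drop l))

def cnt (k : Int) (nums : List Int) (j m : Nat) : Nat := (ends k (nums.take j)).count (m : Int)

def colSpec (k : Int) (nums : List Int) (i : Nat) : List (List Int) :=
  (List.range k.toNat).map (fun m => (List.range (nums.length + 1)).map
    (fun j => if 1 ≤ j ∧ j ≤ i then (cnt k nums j m : Int) else 0))

-- basic list facts --------------------------------------------------------

theorem getD_map_range' {α : Type} (n : Nat) (F : Nat → α) (m : Nat) (d : α) (h : m < n) :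
    ((List.range n).map F).getD m d = F m := by
  rw [List.getD_eq_getElem _ _ (by simpa using h)]
  simp

theorem modify_map_range {α : Type} (n : Nat) (F : Nat → α) (r : Nat) (g : α → α) :
    ((List.range n).map F).modify r g = (List.range n).map (fun m => if m = r then g (F m) else F m) := by
  apply List.ext_getElem
  · simp
  · intro i h1 h2
    rw [List.getElem_modify]
    simp only [List.getElem_map, List.getElem_range (by simpa using h2)]
    by_cases h : r = i <;> simp [h, eq_comm]

theorem count_flatMap_range (n : Nat) (g : Nat → List Int) (m : Int) :
    (((List.range n).flatMap g).count m) = ∑ i ∈ Finset.range n, (g i).count m := by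
  induction n with
  | zero => simp
  | succ n ih => rw [List.range_succ, List.flatMap_append, List.count_append, ih,
      Finset.sum_range_succ]; simp

-- algebra of pq / resid / ends --------------------------------------------

theorem pq_append_singleton (k p x : Int) (ys : List Int) :
    pq k p (ys ++ [x]) = PySem.Int.mod (pq k p ys * x) k := by
  simp [pq, List.foldl_append]

theorem resid_append_singleton (k : Int) (x : Int) :
    ∀ (ys : List Int) (p : Int),
      resid k p (ys ++ [x]) = resid k p ys ++ [PySem.Int.mod (pq k p ys * x) k] := by
  intro ys
  induction ys with
  | nil => intro p; simp [resid, pq]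
  | cons y t ih => intro p; simp [resid, pq, ih, List.foldl]

theorem ends_append_singleton (k x : Int) (t : List Int) :
    ends k (t ++ [x]) = (ends k t).map (fun m => PySem.Int.mod (m * x) k) ++ [PySem.Int.mod x k] := by
  simp [ends, List.foldl_append]

theorem ends_eq_map_pq (k : Int) (t : List Int) :
    ends k t = (List.range t.length).map (fun l => pq k 1 (t.drop l)) := by
  induction t using List.reverseRecOn with
  | nil => simp [ends]
  | append_singleton t x ih =>
    rw [ends_append_singleton, ih]
    simp only [List.length_append, List.length_cons, List.length_nil, List.range_succ,
      List.map_append, List.map_map]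
    congr 1
    · apply List.map_congr_left
      intro l hl
      simp only [List.mem_range] at hl
      simp only [Function.comp]
      rw [List.drop_append_of_le_length (by omega), pq_append_singleton]
    · simp [List.drop_append_of_le_length (le_refl t.length), pq, List.foldl]

theorem ends_bounded (k : Int) (hk : 1 ≤ k) (t : List Int) :
    ∀ v ∈ ends k t, 0 ≤ v ∧ v < k := by
  have h : ∀ (t : List Int) (e : List Int), (∀ v ∈ e, 0 ≤ v ∧ v < k) →
      ∀ v ∈ t.foldl (fun e a => e.map (fun m => PySem.Int.mod (m * a) k) ++ [PySem.Int.mod a k]) e,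
        0 ≤ v ∧ v < k := by
    intro t
    induction t with
    | nil => intro e he v hv; exact he v hv
    | cons a t ih =>
      intro e he v hv
      refine ih _ ?_ v hv
      intro w hw
      rcases List.mem_append.1 hw with hw | hw
      · rcases List.mem_map.1 hw with ⟨u, _, rfl⟩
        exact ⟨PySem.Int.mod_nonneg _ (by omega), PySem.Int.mod_lt _ (by omega)⟩
      · simp only [List.mem_singleton] at hw
        subst hw
        exact ⟨PySem.Int.mod_nonneg _ (by omega), PySem.Int.mod_lt _ (by omega)⟩
  exact h t [] (by simp)

theorem resid_bounded (k : Int) (hk : 1 ≤ k) :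
    ∀ (t : List Int) (p : Int), ∀ v ∈ resid k p t, 0 ≤ v ∧ v < k := by
  intro t
  induction t with
  | nil => intro p v hv; simp [resid] at hv
  | cons x t ih =>
    intro p v hv
    simp only [resid, List.mem_cons] at hv
    rcases hv with rfl | hv
    · exact ⟨PySem.Int.mod_nonneg _ (by omega), PySem.Int.mod_lt _ (by omega)⟩
    · exact ih _ v hv

-- the transpose: counting by end position = counting by start position ----

theorem count_aL_eq_bL (k : Int) (t : List Int) (m : Int) :
    (aL k t).count m = (bL k t).count m := by
  induction t using List.reverseRecOn with
  | nil => simp [aL, bL]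
  | append_singleton t x ih =>
    have hlen : (t ++ [x]).length = t.length + 1 := by simp
    have hmapcount : ∀ (h : Nat → Int),
        (((List.range t.length).map h).count m) = ∑ l ∈ Finset.range t.length, ([h l].count m) := by
      intro h
      rw [List.map_eq_flatMap, count_flatMap_range]
    have hA : (aL k (t ++ [x])).count m
        = (aL k t).count m
          + (((ends k t).map (fun v => PySem.Int.mod (v * x) k)).count m
             + [PySem.Int.mod x k].count m) := by
      unfold aL
      rw [hlen, count_flatMap_range, Finset.sum_range_succ, count_flatMap_range]
      congr 1
      · apply Finset.sum_congr rfl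
        intro i hi
        simp only [Finset.mem_range] at hi
        rw [List.take_append_of_le_length (by omega)]
      · rw [List.take_of_length_le (by simp), ends_append_singleton, List.count_append]
    have hB : (bL k (t ++ [x])).count m
        = (bL k t).count m
          + ((((List.range t.length).map (fun l => PySem.Int.mod (pq k 1 (t.drop l) * x) k)).count m)
             + [PySem.Int.mod x k].count m) := by
      unfold bL
      rw [hlen, count_flatMap_range]
      have hterm : ∀ l ∈ Finset.range (t.length + 1),
          (resid k 1 ((t ++ [x]).drop l)).count m
          = (resid k 1 (t.drop l)).count m
            + [PySem.Int.mod (pq k 1 (t.drop l) * x) k].count m := by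
        intro l hl
        simp only [Finset.mem_range] at hl
        rw [List.drop_append_of_le_length (by omega), resid_append_singleton, List.count_append]
      rw [Finset.sum_congr rfl hterm, Finset.sum_add_distrib]
      congr 1
      · rw [Finset.sum_range_succ, List.drop_length, count_flatMap_range]
        simp [resid]
      · rw [Finset.sum_range_succ, List.drop_length, hmapcount]
        simp [pq]
    have hmid : ((ends k t).map (fun v => PySem.Int.mod (v * x) k)).count m
        = ((List.range t.length).map (fun l => PySem.Int.mod (pq k 1 (t.drop l) * x) k)).count m := by
      rw [ends_eq_map_pq, List.map_map]
      rfl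
    omega

-- counts of a mapped bounded list as a sum over residues ------------------

theorem count_map_bounded (k : Int) (hk : 1 ≤ k) (f : Int → Int) (m : Int) :
    ∀ (L : List Int), (∀ v ∈ L, 0 ≤ v ∧ v < k) →
      (L.map f).count m = ∑ m' ∈ Finset.range k.toNat, if f (m' : Int) = m then L.count (m' : Int) else 0 := by
  intro L
  induction L with
  | nil => simp
  | cons v L ih =>
    intro hb
    obtain ⟨h0, h1⟩ := hb v (List.mem_cons_self ..)
    have ihL := ih (fun w hw => hb w (List.mem_cons_of_mem _ hw))
    have hmem : v.toNat ∈ Finset.range k.toNat := by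
      simp only [Finset.mem_range]
      omega
    have hsplit : ∀ m' ∈ Finset.range k.toNat,
        (if f (m' : Int) = m then (v :: L).count (m' : Int) else 0)
        = (if f (m' : Int) = m then L.count (m' : Int) else 0)
          + (if m' = v.toNat then (if f v = m then 1 else 0) else 0) := by
      intro m' _
      by_cases hq : m' = v.toNat
      · subst hq
        have hcast : ((v.toNat : Nat) : Int) = v := Int.toNat_of_nonneg h0
        rw [hcast]
        simp
        split_ifs <;> omega
      · have hne : ¬ (v = (m' : Int)) := by
          intro hc
          apply hq
          omega
        simp [hne, hq]
    rw [Finset.sum_congr rfl hsplit, Finset.sum_add_distrib, ← ihL,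
      Finset.sum_ite_eq' (Finset.range k.toNat) v.toNat
        (fun _ => (if f v = m then 1 else 0)), if_pos hmem]
    simp [List.count_cons]

-- A-side: the dp fold computes colSpec ------------------------------------

theorem cnt_zero (k : Int) (nums : List Int) (m : Nat) : cnt k nums 0 m = 0 := by
  simp [cnt, ends]

def psum (k a : Int) (nums : List Int) (i0 s m : Nat) : Int :=
  ∑ m' ∈ Finset.range s,
    (if PySem.Int.mod ((m' : Int) * a) k = (m : Int) then (cnt k nums i0 m' : Int) else 0)

def partSpec (k a : Int) (nums : List Int) (i0 s : Nat) : List (List Int) :=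
  (List.range k.toNat).map (fun m => (List.range (nums.length + 1)).map
    (fun j => if 1 ≤ j ∧ j ≤ i0 then (cnt k nums j m : Int)
              else if j = i0 + 1 then psum k a nums i0 s m else 0))

theorem inner_inv (nums : List Int) (k a : Int) (hk : 1 ≤ k) (i0 : Nat) (hi : i0 < nums.length) :
    ∀ s ≤ k.toNat,
      (List.range s).foldl (fun d2 m =>
        d2.modify (PySem.Int.mod ((m : Int) * a) k).toNat
          (fun row => row.modify (i0 + 1) (· + (d2.getD m []).getD i0 0))) (colSpec k nums i0)
      = partSpec k a nums i0 s := by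
  intro s
  induction s with
  | zero =>
    intro _
    unfold colSpec partSpec
    simp only [List.range_zero, List.foldl_nil]
    apply List.map_congr_left
    intro m _
    apply List.map_congr_left
    intro j _
    by_cases h1 : 1 ≤ j ∧ j ≤ i0
    · simp [h1]
    · by_cases h2 : j = i0 + 1 <;> simp [h1, h2, psum]
  | succ s ih =>
    intro hs
    rw [List.range_succ, List.foldl_append, ih (by omega), List.foldl_cons, List.foldl_nil]
    have hR0 : 0 ≤ PySem.Int.mod ((s : Int) * a) k := PySem.Int.mod_nonneg _ (by omega)
    have hRk : PySem.Int.mod ((s : Int) * a) k < k := PySem.Int.mod_lt _ (by omega)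
    have hRK : (PySem.Int.mod ((s : Int) * a) k).toNat < k.toNat := by omega
    have hRcast : (((PySem.Int.mod ((s : Int) * a) k).toNat : Nat) : Int)
        = PySem.Int.mod ((s : Int) * a) k := Int.toNat_of_nonneg hR0
    -- the value read from column i0 of the current state
    have hread : ((partSpec k a nums i0 s).getD s []).getD i0 0 = (cnt k nums i0 s : Int) := by
      unfold partSpec
      rw [getD_map_range' _ _ _ _ (by omega), getD_map_range' _ _ _ _ (by omega)]
      by_cases h1 : 1 ≤ i0
      · simp [h1]
      · have h0 : i0 = 0 := by omega
        simp [h0, cnt_zero]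
    rw [hread]
    unfold partSpec
    rw [modify_map_range]
    apply List.map_congr_left
    intro m hm
    simp only [List.mem_range] at hm
    by_cases hmr : m = (PySem.Int.mod ((s : Int) * a) k).toNat
    · rw [if_pos hmr, modify_map_range]
      apply List.map_congr_left
      intro j hj
      simp only [List.mem_range] at hj
      by_cases hji : j = i0 + 1
      · subst hji
        have h1 : ¬ (1 ≤ i0 + 1 ∧ i0 + 1 ≤ i0) := by omega
        have hc : PySem.Int.mod ((s : Int) * a) k = (m : Int) := by
          rw [hmr, hRcast]
        simp only [if_pos rfl, h1, if_false, if_true]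
        rw [psum, psum, Finset.sum_range_succ, if_pos hc]
      · simp only [hji, if_false]
    · rw [if_neg hmr]
      apply List.map_congr_left
      intro j hj
      by_cases hji : j = i0 + 1
      · subst hji
        have h1 : ¬ (1 ≤ i0 + 1 ∧ i0 + 1 ≤ i0) := by omega
        have hc : ¬ (PySem.Int.mod ((s : Int) * a) k = (m : Int)) := by
          intro hc
          apply hmr
          omega
        simp only [h1, if_false, if_true, if_pos rfl]
        rw [psum, psum, Finset.sum_range_succ, if_neg hc, add_zero]
      · simp only [hji, if_false]

theorem outer_inv (nums : List Int) (k : Int) (hk : 1 ≤ k) :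
    ∀ i ≤ nums.length,
      (List.range i).foldl (fun d i0 =>
        let i := i0 + 1
        let a := nums.getD (i - 1) 0
        let d1 := (List.range k.toNat).foldl (fun d2 m =>
          d2.modify (PySem.Int.mod ((m : Int) * a) k).toNat
            (fun row => row.modify i (· + (d2.getD m []).getD (i - 1) 0))) d
        d1.modify (PySem.Int.mod a k).toNat (fun row => row.modify i (· + 1)))
        ((List.range k.toNat).map (fun _ => List.replicate (nums.length + 1) (0 : Int)))
      = colSpec k nums i := by
  intro i
  induction i with
  | zero =>
    intro _
    simp only [List.range_zero, List.foldl_nil]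
    unfold colSpec
    apply List.map_congr_left
    intro m _
    have hz : (List.range (nums.length + 1)).map
        (fun j => if 1 ≤ j ∧ j ≤ 0 then (cnt k nums j m : Int) else 0)
        = (List.range (nums.length + 1)).map (fun _ => (0 : Int)) := by
      apply List.map_congr_left
      intro j _
      have : ¬ (1 ≤ j ∧ j ≤ 0) := by omega
      rw [if_neg this]
    rw [hz, List.map_const', List.length_range]
  | succ i ih =>
    intro hi
    rw [List.range_succ, List.foldl_append, ih (by omega), List.foldl_cons, List.foldl_nil]
    show ((List.range k.toNat).foldl (fun d2 m =>
        d2.modify (PySem.Int.mod ((m : Int) * (nums.getD i 0)) k).toNat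
          (fun row => row.modify (i + 1) (· + (d2.getD m []).getD i 0))) (colSpec k nums i)).modify
        (PySem.Int.mod (nums.getD i 0) k).toNat (fun row => row.modify (i + 1) (· + 1))
      = colSpec k nums (i + 1)
    rw [inner_inv nums k (nums.getD i 0) hk i (by omega) k.toNat (le_refl _)]
    have hR0 : 0 ≤ PySem.Int.mod (nums.getD i 0) k := PySem.Int.mod_nonneg _ (by omega)
    have hRk : PySem.Int.mod (nums.getD i 0) k < k := PySem.Int.mod_lt _ (by omega)
    have hkey : ∀ m, m < k.toNat →
        (cnt k nums (i + 1) m : Int)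
        = psum k (nums.getD i 0) nums i k.toNat m
          + (if m = (PySem.Int.mod (nums.getD i 0) k).toNat then 1 else 0) := by
      intro m _
      have hilt : i < nums.length := by omega
      have ha : nums.getD i 0 = nums[i] := List.getD_eq_getElem _ _ hilt
      unfold cnt
      rw [List.take_add_one, List.getElem?_eq_getElem hilt]
      simp only [Option.toList_some]
      rw [ends_append_singleton, List.count_append,
        count_map_bounded k hk (fun v => PySem.Int.mod (v * nums[i]) k) (m : Int)
          (ends k (nums.take i)) (ends_bounded k hk _),
        List.count_singleton]
      push_cast
      rw [psum]
      congr 1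
      · apply Finset.sum_congr rfl
        intro m' _
        rw [ha]
        unfold cnt
        by_cases hc : PySem.Int.mod ((m' : Int) * nums[i]) k = (m : Int) <;> simp [hc]
      · rw [ha]
        have hR0' := hR0
        rw [ha] at hR0'
        by_cases hc : PySem.Int.mod nums[i] k = (m : Int)
        · have hm' : m = (PySem.Int.mod nums[i] k).toNat := by omega
          rw [if_pos hm']
          simp [hc]
        · have hm' : ¬ (m = (PySem.Int.mod nums[i] k).toNat) := by
            intro he
            apply hc
            omega
          rw [if_neg hm']
          simp [hc]
    unfold partSpec colSpec
    rw [modify_map_range]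
    apply List.map_congr_left
    intro m hm
    simp only [List.mem_range] at hm
    by_cases hmr : m = (PySem.Int.mod (nums.getD i 0) k).toNat
    · rw [if_pos hmr, modify_map_range]
      apply List.map_congr_left
      intro j hj
      simp only [List.mem_range] at hj
      by_cases hji : j = i + 1
      · subst hji
        split_ifs <;> first
          | rfl
          | omega
          | (rw [hkey m hm, if_pos hmr])
          | (rw [hkey m hm, if_neg hmr, add_zero])
      · split_ifs <;> first | rfl | omega
    · rw [if_neg hmr]
      apply List.map_congr_left
      intro j hj
      simp only [List.mem_range] at hj
      by_cases hji : j = i + 1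
      · subst hji
        split_ifs <;> first
          | rfl
          | omega
          | (rw [hkey m hm, if_pos hmr])
          | (rw [hkey m hm, if_neg hmr, add_zero])
      · split_ifs <;> first | rfl | omega

theorem sum_map_range_int (n : Nat) (f : Nat → Int) :
    ((List.range n).map f).sum = ∑ j ∈ Finset.range n, f j := by
  induction n with
  | zero => simp
  | succ n ih =>
    rw [List.range_succ, List.map_append, List.sum_append, Finset.sum_range_succ, ih]
    simp

theorem A_eq_counts (nums : List Int) (k : Int) (hk : 1 ≤ k) :
    resultArray nums k = (List.range k.toNat).map (fun (m : Nat) => ((aL k nums).count ((m : Int)) : Int)) := by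
  have h := outer_inv nums k hk nums.length (le_refl _)
  calc resultArray nums k = (colSpec k nums nums.length).map (fun row => row.sum) := by
        rw [← h]
        rfl
    _ = (List.range k.toNat).map (fun (m : Nat) => ((aL k nums).count ((m : Int)) : Int)) := by
        unfold colSpec
        rw [List.map_map]
        apply List.map_congr_left
        intro m hm
        simp only [List.mem_range] at hm
        simp only [Function.comp]
        rw [sum_map_range_int, Finset.sum_range_succ']
        have h0 : ¬ (1 ≤ 0 ∧ 0 ≤ nums.length) := by omega
        rw [if_neg h0, add_zero]
        have hc : ((aL k nums).count (m : Int) : Int)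
            = ((∑ i ∈ Finset.range nums.length, (ends k (nums.take (i + 1))).count (m : Int) : Nat) : Int) := by
          unfold aL
          rw [count_flatMap_range]
        rw [hc, Nat.cast_sum]
        apply Finset.sum_congr rfl
        intro j hj
        simp only [Finset.mem_range] at hj
        have hcond : 1 ≤ j + 1 ∧ j + 1 ≤ nums.length := by omega
        rw [if_pos hcond]
        rfl

-- B-side ------------------------------------------------------------------

theorem inner_pair (k : Int) : ∀ (xs : List Int) (p : Int) (ans : List Int),
    xs.foldl (fun (st : Int × List Int) x =>
        let p := PySem.Int.mod (st.1 * x) k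
        (p, st.2.modify p.toNat (· + 1))) (p, ans)
    = (pq k p xs, (resid k p xs).foldl (fun v q => v.modify q.toNat (· + 1)) ans) := by
  intro xs
  induction xs with
  | nil => intro p ans; simp [pq, resid]
  | cons x t ih =>
    intro p ans
    rw [List.foldl_cons]
    show (t.foldl _ (PySem.Int.mod (p * x) k, ans.modify (PySem.Int.mod (p * x) k).toNat (· + 1))) = _
    rw [ih]
    simp [pq, resid]

theorem length_foldl_inc : ∀ (rs : List Int) (v : List Int),
    (rs.foldl (fun v q => v.modify q.toNat (· + 1)) v).length = v.length := by
  intro rs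
  induction rs with
  | nil => intro v; rfl
  | cons q t ih => intro v; rw [List.foldl_cons, ih, List.length_modify]

theorem getD_foldl_inc (k : Int) : ∀ (rs : List Int) (v : List Int) (m : Nat),
    m < v.length → (∀ q ∈ rs, 0 ≤ q ∧ q < k) → (k.toNat ≤ v.length) →
    (rs.foldl (fun v q => v.modify q.toNat (· + 1)) v).getD m 0
      = v.getD m 0 + (rs.count (m : Int) : Int) := by
  intro rs
  induction rs with
  | nil => intro v m hm _ _; simp
  | cons q t ih =>
    intro v m hm hb hlen
    obtain ⟨h0, h1⟩ := hb q (List.mem_cons_self ..)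
    rw [List.foldl_cons,
      ih _ m (by rw [List.length_modify]; exact hm)
        (fun w hw => hb w (List.mem_cons_of_mem _ hw))
        (by rw [List.length_modify]; exact hlen)]
    have hgd : (v.modify q.toNat (· + 1)).getD m 0
        = if q.toNat = m then v.getD m 0 + 1 else v.getD m 0 := by
      rw [List.getD_eq_getElem _ _ (by rw [List.length_modify]; exact hm), List.getElem_modify]
      by_cases h : q.toNat = m <;>
        simp [h, List.getD_eq_getElem _ _ hm, List.getElem?_eq_getElem hm]
    rw [hgd]
    by_cases h : q.toNat = m
    · have hq : q = (m : Int) := by omega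
      simp [List.count_cons, hq, h]
      push_cast
      ring
    · have hq : ¬ (q = (m : Int)) := by omega
      simp [List.count_cons, hq, h]

theorem B_eq_counts (nums : List Int) (k : Int) (hk : 1 ≤ k) :
    resultArray_alt nums k = (List.range k.toNat).map (fun (m : Nat) => ((bL k nums).count ((m : Int)) : Int)) := by
  have hbound : ∀ q ∈ bL k nums, 0 ≤ q ∧ q < k := by
    intro q hq
    unfold bL at hq
    rw [List.mem_flatMap] at hq
    obtain ⟨l, _, hq⟩ := hq
    exact resid_bounded k hk _ _ q hq
  have hfun : (fun (ans : List Int) (l : Nat) =>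
      ((nums.drop l).foldl (fun (st : Int × List Int) x =>
        let p := PySem.Int.mod (st.1 * x) k
        (p, st.2.modify p.toNat (· + 1))) ((1 : Int), ans)).2)
      = (fun (acc : List Int) (l : Nat) =>
          (resid k 1 (nums.drop l)).foldl (fun v q => v.modify q.toNat (· + 1)) acc) := by
    funext ans l
    rw [inner_pair]
  have h1 : resultArray_alt nums k
      = (bL k nums).foldl (fun v q => v.modify q.toNat (· + 1)) (List.replicate k.toNat 0) := by
    unfold resultArray_alt bL
    rw [List.foldl_flatMap, hfun]
  rw [h1]
  apply List.ext_getElem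
  · rw [length_foldl_inc]
    simp
  · intro m hm1 hm2
    have hmK : m < k.toNat := by
      rw [length_foldl_inc, List.length_replicate] at hm1
      exact hm1
    rw [← List.getD_eq_getElem _ 0 hm1, ← List.getD_eq_getElem _ 0 hm2,
      getD_foldl_inc k _ _ m (by simpa using hmK) hbound (by simp),
      getD_map_range' _ _ _ _ hmK]
    simp

-- ===== VERDICT (by name: the statement is the Claim_ definition above) =====
theorem resultArray_spec : Claim_equal_resultArray := by
  intro nums k _ hpre
  unfold Spec_resultArray
  by_cases hk : 1 ≤ k
  · rw [A_eq_counts nums k hk, B_eq_counts nums k hk]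
    apply List.map_congr_left
    intro m _
    rw [count_aL_eq_bL]
  · rcases hpre with hpre | rfl
    · omega
    · simp [resultArray, resultArray_alt, List.map_const']
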